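-- pv_equiv track=rewrite | github.com/need-singularity/sylvian-singularity | verify/verify_frontier1_math.py | zagier_dims
-- ===== SOURCE A (Python) =====
-- def zagier_dims(up_to):
--     """d_k satisfying d_k = d_{k-2} + d_{k-3}, d_0=1, d_1=0, d_2=1."""
--     d = [0] * (up_to + 1)
--     d[0] = 1
--     if up_to >= 1:
--         d[1] = 0
--     if up_to >= 2:
--         d[2] = 1
--     for k in range(3, up_to + 1):
--         d[k] = d[k - 2] + d[k - 3]
--     return d
-- ===== SOURCE B (Python) =====
-- def zagier_dims(up_to):
--     """d_k satisfying d_k = d_{k-2} + d_{k-3}, d_0=1, d_1=0, d_2=1.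
--
--     Uses the equivalent first-order-lag identity d_k = d_{k-1} + d_{k-5} (k >= 5),
--     which follows from the defining recurrence:
--     d_k - d_{k-1} = (d_{k-2}+d_{k-3}) - (d_{k-3}+d_{k-4}) = d_{k-2} - d_{k-4} = d_{k-5}.
--     Only the last and the fifth-last entries are read, never arbitrary back-indexing.
--     """
--     if up_to < 0:
--         return []
--     res = [1, 0, 1, 1, 1][:up_to + 1]
--     for _ in range(5, up_to + 1):
--         res.append(res[-1] + res[-5])
--     return res
-- ===== Notes on version B (the rewrite author's own statement) =====
-- stated objective: alternative
-- what changed: B computes the sequence by the derived identity d_k = d_{k-1} + d_{k-5} (seeded with the five base values [1,0,1,1,1]) instead of A's defining recurrence d[k] = d[k-2] + d[k-3] over a preallocated array; correctness rests on the proved algebraic identity relating the two recurrences.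
import Mathlib
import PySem

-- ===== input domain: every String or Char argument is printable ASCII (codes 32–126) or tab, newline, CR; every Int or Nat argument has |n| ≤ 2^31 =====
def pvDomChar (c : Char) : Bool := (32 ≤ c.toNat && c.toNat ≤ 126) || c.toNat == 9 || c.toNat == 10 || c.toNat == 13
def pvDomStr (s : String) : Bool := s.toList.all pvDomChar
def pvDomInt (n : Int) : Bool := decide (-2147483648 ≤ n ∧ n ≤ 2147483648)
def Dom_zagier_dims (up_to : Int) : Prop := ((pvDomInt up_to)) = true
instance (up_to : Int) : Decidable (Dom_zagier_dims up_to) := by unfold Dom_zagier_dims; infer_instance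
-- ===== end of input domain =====

-- B replaces A's defining recurrence d[k]=d[k-2]+d[k-3] over a preallocated array by the
-- derived lag-5 identity d_k = d_{k-1} + d_{k-5} with a five-element seed (objective: alternative).

-- ===== PORT A =====
def zagier_dims (up_to : Int) : List Int :=
  let d := List.replicate (up_to + 1).toNat (0 : Int)
  let d := PySem.List.pySetD d 0 1
  let d := if up_to ≥ 1 then PySem.List.pySetD d 1 0 else d
  let d := if up_to ≥ 2 then PySem.List.pySetD d 2 1 else d
  (PySem.List.pyRange 3 (up_to + 1) 1).foldl
    (fun d k =>
      PySem.List.pySetD d k (PySem.List.pyGetD d (k - 2) 0 + PySem.List.pyGetD d (k - 3) 0)) d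

-- ===== PORT B =====
def zagier_dims_alt (up_to : Int) : List Int :=
  if up_to < 0 then []
  else
    (PySem.List.pyRange 5 (up_to + 1) 1).foldl
      (fun res _ =>
        res ++ [PySem.List.pyGetD res (-1) 0 + PySem.List.pyGetD res (-5) 0])
      (([1, 0, 1, 1, 1] : List Int).take (up_to + 1).toNat)

-- ===== PRECONDITION & SPEC =====
-- A raises IndexError on negative up_to (the first assignment indexes an empty list), so those inputs are excluded.
def Pre_zagier_dims (up_to : Int) : Prop := 0 ≤ up_to
instance (up_to : Int) : Decidable (Pre_zagier_dims up_to) := by unfold Pre_zagier_dims; infer_instance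
def pvWitness_zagier_dims : Int := 5

def Spec_zagier_dims (up_to : Int) (out : List Int) : Prop := out = zagier_dims_alt up_to
instance (up_to : Int) (out : List Int) : Decidable (Spec_zagier_dims up_to out) := by unfold Spec_zagier_dims; infer_instance

-- ===== CLAIM (what is proved, stated in full; the proofs are below) =====
def Claim_equal_zagier_dims : Prop := ∀ (up_to : Int), Dom_zagier_dims up_to → Pre_zagier_dims up_to → Spec_zagier_dims up_to (zagier_dims up_to)

-- ===== LEMMAS AND PROOFS =====

-- the mathematical sequence d_k
def zf : Nat → Int
  | 0 => 1
  | 1 => 0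
  | 2 => 1
  | n + 3 => zf (n + 1) + zf n

def zref (n : Nat) : List Int := (List.range (n + 1)).map zf

-- the lag-5 identity B relies on: d_{m+5} = d_{m+4} + d_m
lemma zf_lag5 (m : Nat) : zf (m + 5) = zf (m + 4) + zf m := by
  have e5 : zf (m + 5) = zf (m + 3) + zf (m + 2) := by
    rw [show m + 5 = (m + 2) + 3 by ring]; rfl
  have e4 : zf (m + 4) = zf (m + 2) + zf (m + 1) := by
    rw [show m + 4 = (m + 1) + 3 by ring]; rfl
  have e3 : zf (m + 3) = zf (m + 1) + zf m := rfl
  rw [e5, e4, e3]; ring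

lemma b_loop (j : Nat) :
    (PySem.List.pyRange 5 (5 + (j : Int)) 1).foldl
      (fun res _ =>
        res ++ [PySem.List.pyGetD res (-1) 0 + PySem.List.pyGetD res (-5) 0])
      ((List.range 5).map zf)
    = (List.range (5 + j)).map zf := by
  induction j with
  | zero => rw [PySem.List.pyRange_one_eq_nil (by omega)]; simp
  | succ j ih =>
    have hup : (5 + ((j + 1 : Nat)) : Int) = (5 + (j : Int)) + 1 := by push_cast; ring
    rw [hup, PySem.List.pyRange_one_succ_right (by omega), List.foldl_append, ih]
    simp only [List.foldl_cons, List.foldl_nil]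
    have hlen : ((List.range (5 + j)).map zf).length = 5 + j := by simp
    have hg1 : PySem.List.pyGetD ((List.range (5 + j)).map zf) (-1) 0 = zf (4 + j) := by
      rw [PySem.List.pyGetD_neg_ofNat _ 1 0 (by omega) (by omega)]
      simp only [hlen]
      rw [List.getElem_map, List.getElem_range]
      congr 1; omega
    have hg5 : PySem.List.pyGetD ((List.range (5 + j)).map zf) (-5) 0 = zf j := by
      rw [PySem.List.pyGetD_neg_ofNat _ 5 0 (by omega) (by omega)]
      simp only [hlen]
      rw [List.getElem_map, List.getElem_range]
      congr 1; omega
    rw [hg1, hg5]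
    have hv : zf (4 + j) + zf j = zf (5 + j) := by
      have := zf_lag5 j
      rw [show j + 5 = 5 + j by ring, show j + 4 = 4 + j by ring] at this
      omega
    rw [hv, show 5 + (j + 1) = (5 + j) + 1 by ring, List.range_succ]
    simp

lemma alt_eq_zref (n : Nat) : zagier_dims_alt (n : Int) = zref n := by
  rcases Nat.lt_or_ge n 5 with h | h
  · interval_cases n <;> decide
  · have hn : ¬ ((n : Int) < 0) := by omega
    have h1 : ((n : Int) + 1).toNat = n + 1 := by omega
    rw [zagier_dims_alt, if_neg hn, h1]
    have htake : ([1, 0, 1, 1, 1] : List Int).take (n + 1) = (List.range 5).map zf := by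
      rw [List.take_of_length_le (by simp; omega)]; decide
    have hup : ((n : Int) + 1) = 5 + ((n - 4 : Nat) : Int) := by omega
    rw [htake, hup, b_loop (n - 4), zref, show 5 + (n - 4) = n + 1 by omega]

lemma a_inv (n : Nat) (h2 : 2 ≤ n) : ∀ m : Nat, m ≤ n - 2 →
    (PySem.List.pyRange 3 (3 + (m : Int)) 1).foldl
      (fun d k =>
        PySem.List.pySetD d k (PySem.List.pyGetD d (k - 2) 0 + PySem.List.pyGetD d (k - 3) 0))
      ((List.range 3).map zf ++ List.replicate (n - 2) 0)
    = (List.range (3 + m)).map zf ++ List.replicate (n - 2 - m) 0 := by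
  intro m
  induction m with
  | zero => intro _; rw [PySem.List.pyRange_one_eq_nil (by omega)]; simp
  | succ m ih =>
    intro hm
    have hup : (3 + ((m + 1 : Nat)) : Int) = (3 + (m : Int)) + 1 := by push_cast; ring
    rw [hup, PySem.List.pyRange_one_succ_right (by omega), List.foldl_append,
        ih (by omega)]
    simp only [List.foldl_cons, List.foldl_nil]
    have e2 : (3 + (m : Int)) - 2 = ((m + 1 : Nat) : Int) := by push_cast; ring
    have e3 : (3 + (m : Int)) - 3 = ((m : Nat) : Int) := by ring
    have ek : (3 + (m : Int)) = (((3 + m : Nat)) : Int) := by push_cast; ring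
    rw [e2, e3, ek, PySem.List.pyGetD_natCast, PySem.List.pyGetD_natCast,
        PySem.List.pySetD_natCast]
    have hget1 : (((List.range (3 + m)).map zf ++ List.replicate (n - 2 - m) 0).getD (m + 1) 0) = zf (m + 1) := by
      rw [List.getD_eq_getElem?_getD, List.getElem?_append_left (by simp only [List.length_map, List.length_range]; omega),
          List.getElem?_map, List.getElem?_range (by omega)]
      rfl
    have hget2 : (((List.range (3 + m)).map zf ++ List.replicate (n - 2 - m) 0).getD m 0) = zf m := by
      rw [List.getD_eq_getElem?_getD, List.getElem?_append_left (by simp only [List.length_map, List.length_range]; omega),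
          List.getElem?_map, List.getElem?_range (by omega)]
      rfl
    rw [hget1, hget2]
    have hv : zf (m + 1) + zf m = zf (3 + m) := by
      rw [Nat.add_comm 3 m]; rfl
    have hrep : List.replicate (n - 2 - m) (0 : Int) = 0 :: List.replicate (n - 2 - (m + 1)) 0 := by
      have : n - 2 - m = (n - 2 - (m + 1)) + 1 := by omega
      rw [this, List.replicate_succ]
    rw [List.set_append, if_neg (by simp)]
    simp only [List.length_map, List.length_range, Nat.sub_self, hrep]
    rw [hv]
    show _ ++ zf (3 + m) :: _ = _
    have : List.range (3 + (m + 1)) = List.range (3 + m) ++ [3 + m] := by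
      rw [show 3 + (m + 1) = (3 + m) + 1 from rfl, List.range_succ]
    rw [this]
    simp

lemma a_eq_zref (n : Nat) : zagier_dims (n : Int) = zref n := by
  rcases Nat.lt_or_ge n 3 with h | h
  · interval_cases n <;> decide
  · unfold zagier_dims
    dsimp only
    rw [if_pos (show ((n : Int)) ≥ 1 by exact_mod_cast (by omega : 1 ≤ n)),
        if_pos (show ((n : Int)) ≥ 2 by exact_mod_cast (by omega : 2 ≤ n))]
    have hlen : ((n : Int) + 1).toNat = n + 1 := by omega
    have hrep : List.replicate (n + 1) (0 : Int) = 0 :: 0 :: 0 :: List.replicate (n - 2) 0 := by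
      have : n + 1 = (n - 2) + 3 := by omega
      rw [this]; rfl
    have hinit : PySem.List.pySetD (PySem.List.pySetD (PySem.List.pySetD
        (List.replicate (n + 1) (0 : Int)) 0 1) 1 0) 2 1
        = (List.range 3).map zf ++ List.replicate (n - 2) 0 := by
      rw [hrep]
      simp [PySem.List.pySetD_of_nonneg, List.set]
      rfl
    rw [hlen, hinit]
    have hup : ((n : Int) + 1) = 3 + ((n - 2 : Nat) : Int) := by push_cast [Nat.cast_sub (by omega : 2 ≤ n)]; ring
    rw [hup, a_inv n (by omega) (n - 2) le_rfl]
    have : 3 + (n - 2) = n + 1 := by omega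
    rw [this]
    simp [zref]

-- ===== VERDICT (by name: the statement is the Claim_ definition above) =====
theorem zagier_dims_spec : Claim_equal_zagier_dims := by
  intro up_to _ hpre
  obtain ⟨n, rfl⟩ := Int.eq_ofNat_of_zero_le hpre
  show zagier_dims _ = zagier_dims_alt _
  rw [a_eq_zref, alt_eq_zref]
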